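-- pv_equiv track=rewrite | github.com/kytos-ng/topology | scripts/vlan_pool.py | generate_ranges
-- ===== SOURCE A (Python) =====
-- DEFAULT_TAG_RANGES = [[1, 4095]]
--
-- def generate_ranges(avoid) -> [list[list[int]]]:
--     """Generate available_tags only from avoid"""
--     if not avoid:
--         return DEFAULT_TAG_RANGES
--
--     avoid.sort()
--     ranges = []
--     start = 1
--
--     for num in avoid:
--         if num > start:
--             ranges.append([start, num - 1])
--         start = num + 1
--
--     if start <= 4095:
--         ranges.append([start, 4095])
--     return ranges
-- ===== SOURCE B (Python) =====
-- DEFAULT_TAG_RANGES = [[1, 4095]]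
--
-- def generate_ranges(avoid) -> [list[list[int]]]:
--     """Generate available_tags only from avoid"""
--     if not avoid:
--         return DEFAULT_TAG_RANGES
--
--     avoid.sort()
--     # pass 1: run-length-merge the sorted values into maximal blocked intervals
--     blocked = []
--     lo = hi = avoid[0]
--     for v in avoid[1:]:
--         if v <= hi + 1:
--             hi = v
--         else:
--             blocked.append((lo, hi))
--             lo = hi = v
--     blocked.append((lo, hi))
--     # pass 2: emit the gaps around the blocked intervals
--     ranges = []
--     prev = 0
--     for b_lo, b_hi in blocked:
--         if prev + 1 <= b_lo - 1:
--             ranges.append([prev + 1, b_lo - 1])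
--         prev = b_hi
--     if prev + 1 <= 4095:
--         ranges.append([prev + 1, 4095])
--     return ranges
-- ===== Notes on version B (the rewrite author's own statement) =====
-- stated objective: alternative
-- what changed: B replaces A's single running-start gap scan with a two-stage pipeline: pass 1 run-length-merges the sorted avoid values into maximal blocked intervals, pass 2 then emits the complement gaps between consecutive blocked intervals (sentinel prev=0 and tail cap 4095).
import Mathlib
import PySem

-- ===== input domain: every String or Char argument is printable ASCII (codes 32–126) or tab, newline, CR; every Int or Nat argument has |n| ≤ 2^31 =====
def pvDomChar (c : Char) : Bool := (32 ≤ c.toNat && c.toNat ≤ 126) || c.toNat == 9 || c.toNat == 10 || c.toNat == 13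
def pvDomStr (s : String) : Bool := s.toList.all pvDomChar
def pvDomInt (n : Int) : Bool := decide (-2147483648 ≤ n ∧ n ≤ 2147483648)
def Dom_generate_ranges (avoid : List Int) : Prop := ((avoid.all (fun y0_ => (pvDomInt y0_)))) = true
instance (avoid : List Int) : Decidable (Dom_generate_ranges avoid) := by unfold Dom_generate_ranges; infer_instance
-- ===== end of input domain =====

-- B replaces A's single running-`start` gap scan with a two-stage pipeline: pass 1 run-length-merges
-- the sorted avoid values into maximal blocked intervals, pass 2 emits the complement gaps around them
-- (objective: alternative, same cost). Both A and B sort `avoid` in place (same side effect); the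
-- equivalence proved is about the return value.

-- ===== PORT A =====
def generate_ranges (avoid : List Int) : List (List Int) :=
  if avoid = [] then [[1, 4095]]
  else
    let s := PySem.List.sorted avoid (fun x => x) false   -- avoid.sort()
    let st := s.foldl (fun (p : List (List Int) × Int) num =>
      (if num > p.2 then p.1 ++ [[p.2, num - 1]] else p.1, num + 1)) ([], 1)
    if st.2 ≤ 4095 then st.1 ++ [[st.2, 4095]] else st.1

-- ===== PORT B =====
def generate_ranges_alt (avoid : List Int) : List (List Int) :=
  if avoid = [] then [[1, 4095]]
  else
    match PySem.List.sorted avoid (fun x => x) false with   -- avoid.sort(); avoid[0] / avoid[1:]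
    | [] => []   -- unreachable: avoid ≠ [], so its sort is nonempty
    | a0 :: rest =>
      -- pass 1: run-length-merge into maximal blocked intervals; state = (blocked, lo, hi)
      let st1 := rest.foldl (fun (st : List (Int × Int) × Int × Int) v =>
        if v ≤ st.2.2 + 1 then (st.1, st.2.1, v)
        else (st.1 ++ [(st.2.1, st.2.2)], v, v)) ([], a0, a0)
      let blocked := st1.1 ++ [(st1.2.1, st1.2.2)]
      -- pass 2: emit the gaps around the blocked intervals; state = (ranges, prev)
      let st2 := blocked.foldl (fun (st : List (List Int) × Int) p =>
        (if st.2 + 1 ≤ p.1 - 1 then st.1 ++ [[st.2 + 1, p.1 - 1]] else st.1, p.2)) ([], 0)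
      if st2.2 + 1 ≤ 4095 then st2.1 ++ [[st2.2 + 1, 4095]] else st2.1

-- ===== PRECONDITION & SPEC =====
def Spec_generate_ranges (avoid : List Int) (out : List (List Int)) : Prop := out = generate_ranges_alt avoid
instance (avoid : List Int) (out : List (List Int)) : Decidable (Spec_generate_ranges avoid out) := by unfold Spec_generate_ranges; infer_instance

-- ===== CLAIM (what is proved, stated in full; the proofs are below) =====
def Claim_equal_generate_ranges : Prop := ∀ (avoid : List Int), Dom_generate_ranges avoid → Spec_generate_ranges avoid (generate_ranges avoid)

-- ===== LEMMAS AND PROOFS =====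

-- Recursive forms of the three loops (proof devices only).
def pvArec (start : Int) : List Int → List (List Int)
  | [] => if start ≤ 4095 then [[start, 4095]] else []
  | n :: t => (if n > start then [[start, n - 1]] else []) ++ pvArec (n + 1) t

def pvP1 (lo hi : Int) : List Int → List (Int × Int)
  | [] => [(lo, hi)]
  | v :: t => if v ≤ hi + 1 then pvP1 lo v t else (lo, hi) :: pvP1 v v t

def pvP2 (p : Int) : List (Int × Int) → List (List Int)
  | [] => if p + 1 ≤ 4095 then [[p + 1, 4095]] else []
  | q :: t => (if p + 1 ≤ q.1 - 1 then [[p + 1, q.1 - 1]] else []) ++ pvP2 q.2 t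

-- A's loop + final append equals pvArec.
theorem pv_A_rec (t : List Int) (acc : List (List Int)) (start : Int) :
    (if (t.foldl (fun (p : List (List Int) × Int) num =>
          (if num > p.2 then p.1 ++ [[p.2, num - 1]] else p.1, num + 1)) (acc, start)).2 ≤ 4095
     then (t.foldl (fun (p : List (List Int) × Int) num =>
          (if num > p.2 then p.1 ++ [[p.2, num - 1]] else p.1, num + 1)) (acc, start)).1
          ++ [[(t.foldl (fun (p : List (List Int) × Int) num =>
          (if num > p.2 then p.1 ++ [[p.2, num - 1]] else p.1, num + 1)) (acc, start)).2, 4095]]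
     else (t.foldl (fun (p : List (List Int) × Int) num =>
          (if num > p.2 then p.1 ++ [[p.2, num - 1]] else p.1, num + 1)) (acc, start)).1)
    = acc ++ pvArec start t := by
  induction t generalizing acc start with
  | nil => simp only [List.foldl_nil, pvArec]; split_ifs <;> simp
  | cons n t ih =>
      simp only [List.foldl_cons, pvArec]
      rw [ih]
      split_ifs <;> simp

-- B's pass-1 loop + final append equals pvP1.
theorem pv_P1_rec (t : List Int) (acc : List (Int × Int)) (lo hi : Int) :
    (t.foldl (fun (st : List (Int × Int) × Int × Int) v =>
        if v ≤ st.2.2 + 1 then (st.1, st.2.1, v)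
        else (st.1 ++ [(st.2.1, st.2.2)], v, v)) (acc, lo, hi)).1
      ++ [((t.foldl (fun (st : List (Int × Int) × Int × Int) v =>
        if v ≤ st.2.2 + 1 then (st.1, st.2.1, v)
        else (st.1 ++ [(st.2.1, st.2.2)], v, v)) (acc, lo, hi)).2.1,
          (t.foldl (fun (st : List (Int × Int) × Int × Int) v =>
        if v ≤ st.2.2 + 1 then (st.1, st.2.1, v)
        else (st.1 ++ [(st.2.1, st.2.2)], v, v)) (acc, lo, hi)).2.2)]
    = acc ++ pvP1 lo hi t := by
  induction t generalizing acc lo hi with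
  | nil => simp [pvP1]
  | cons v t ih =>
      simp only [List.foldl_cons, pvP1]
      split_ifs <;> simp [ih]

-- B's pass-2 loop + final append equals pvP2.
theorem pv_P2_rec (bl : List (Int × Int)) (acc : List (List Int)) (p : Int) :
    (if (bl.foldl (fun (st : List (List Int) × Int) q =>
          (if st.2 + 1 ≤ q.1 - 1 then st.1 ++ [[st.2 + 1, q.1 - 1]] else st.1, q.2)) (acc, p)).2 + 1 ≤ 4095
     then (bl.foldl (fun (st : List (List Int) × Int) q =>
          (if st.2 + 1 ≤ q.1 - 1 then st.1 ++ [[st.2 + 1, q.1 - 1]] else st.1, q.2)) (acc, p)).1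
          ++ [[(bl.foldl (fun (st : List (List Int) × Int) q =>
          (if st.2 + 1 ≤ q.1 - 1 then st.1 ++ [[st.2 + 1, q.1 - 1]] else st.1, q.2)) (acc, p)).2 + 1, 4095]]
     else (bl.foldl (fun (st : List (List Int) × Int) q =>
          (if st.2 + 1 ≤ q.1 - 1 then st.1 ++ [[st.2 + 1, q.1 - 1]] else st.1, q.2)) (acc, p)).1)
    = acc ++ pvP2 p bl := by
  induction bl generalizing acc p with
  | nil => simp only [List.foldl_nil, pvP2]; split_ifs <;> simp
  | cons q t ih =>
      simp only [List.foldl_cons, pvP2]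
      rw [ih]
      split_ifs <;> simp

-- Fused pipeline: pass 2 of pass 1 equals A's gap scan (for ANY tail, sorted or not).
theorem pv_fuse (t : List Int) (p lo hi : Int) :
    pvP2 p (pvP1 lo hi t)
    = (if p + 1 ≤ lo - 1 then [[p + 1, lo - 1]] else []) ++ pvArec (hi + 1) t := by
  induction t generalizing p lo hi with
  | nil => simp [pvP1, pvP2, pvArec]
  | cons v t ih =>
      simp only [pvP1, pvArec]
      by_cases h : v ≤ hi + 1
      · rw [if_pos h, ih]
        have : ¬ v > hi + 1 := by omega
        simp [this]
      · rw [if_neg h]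
        simp only [pvP2, ih]
        have h1 : hi + 1 ≤ v - 1 := by omega
        have h2 : v > hi + 1 := by omega
        simp [h1, h2]

theorem generate_ranges_eq (avoid : List Int) :
    generate_ranges avoid = generate_ranges_alt avoid := by
  unfold generate_ranges generate_ranges_alt
  by_cases h : avoid = []
  · simp [h]
  · simp only [h, if_false]
    have hs : PySem.List.sorted avoid (fun x => x) false ≠ [] := by
      simpa [PySem.List.sorted_eq_nil_iff] using h
    obtain ⟨a0, rest, he⟩ := List.exists_cons_of_ne_nil hs
    rw [he]
    simp only
    rw [pv_P1_rec rest [] a0 a0, pv_P2_rec]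
    simp only [List.nil_append]
    rw [pv_fuse rest 0 a0 a0]
    have := pv_A_rec (a0 :: rest) [] 1
    simp only [List.nil_append] at this
    rw [this]
    simp only [pvArec]
    split_ifs with h1 h2 h2 <;> first | rfl | omega

-- ===== VERDICT (by name: the statement is the Claim_ definition above) =====
theorem generate_ranges_spec : Claim_equal_generate_ranges := by
  intro avoid _
  exact generate_ranges_eq avoid
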